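-- pv_equiv track=rewrite | github.com/subhankar235/biasness-hack2skill | backend/app/core/sensitive_detector.py | detect_sensitive_columns
-- ===== SOURCE A (Python) =====
-- SENSITIVE_KEYWORDS = [
--     "gender", "sex", "race", "ethnicity",
--     "age", "religion", "marital", "nationality"
-- ]
--
-- def detect_sensitive_columns(columns):
--     found = []
--
--     for col in columns:
--         lower = col.lower()
--         for keyword in SENSITIVE_KEYWORDS:
--             if keyword in lower:
--                 found.append(col)
--                 break
--
--     return found
-- ===== SOURCE B (Python) =====
-- SENSITIVE_KEYWORDS = [
--     "gender", "sex", "race", "ethnicity",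
--     "age", "religion", "marital", "nationality"
-- ]
--
-- def detect_sensitive_columns(columns):
--     # keyword-outer sweep over a boolean mask; order of columns is restored by
--     # the final zip, so the traversal order change does not affect the result
--     lows = [col.lower() for col in columns]
--     hit = [False] * len(columns)
--     for keyword in SENSITIVE_KEYWORDS:
--         hit = [h or (keyword in low) for h, low in zip(hit, lows)]
--     return [col for col, h in zip(columns, hit) if h]
-- ===== Notes on version B (the rewrite author's own statement) =====
-- stated objective: alternative
-- what changed: B inverts the loop nesting: it lowers each column once, then sweeps keyword-by-keyword over a boolean mask of all columns (no per-column inner keyword loop with break), and finally filters the original columns by the mask.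
import Mathlib
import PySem

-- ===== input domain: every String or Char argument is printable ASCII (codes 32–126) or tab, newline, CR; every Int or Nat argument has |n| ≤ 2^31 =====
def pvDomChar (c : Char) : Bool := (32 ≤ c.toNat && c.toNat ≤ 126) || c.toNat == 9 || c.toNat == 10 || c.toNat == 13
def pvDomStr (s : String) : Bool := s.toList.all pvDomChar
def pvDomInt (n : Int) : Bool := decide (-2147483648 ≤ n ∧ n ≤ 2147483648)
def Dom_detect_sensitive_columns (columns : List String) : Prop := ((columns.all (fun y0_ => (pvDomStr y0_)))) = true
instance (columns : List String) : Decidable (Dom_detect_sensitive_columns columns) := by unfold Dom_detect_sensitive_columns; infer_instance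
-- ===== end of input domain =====

-- B inverts the loop nesting: columns are lowered once, then a boolean mask over all columns is
-- swept keyword-by-keyword (no per-column inner keyword loop with break), and the original
-- columns are filtered by the final mask; objective: alternative.

def pvKeywords : List (List Char) :=
  [['g','e','n','d','e','r'], ['s','e','x'], ['r','a','c','e'],
   ['e','t','h','n','i','c','i','t','y'], ['a','g','e'],
   ['r','e','l','i','g','i','o','n'], ['m','a','r','i','t','a','l'],
   ['n','a','t','i','o','n','a','l','i','t','y']]

-- ===== PORT A =====
-- inner 'for keyword in SENSITIVE_KEYWORDS: if keyword in lower: found.append(col); break'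
def pvInnerA : List (List Char) → List Char → Bool
  | [], _ => false
  | k :: ks, lower => if PySem.Chars.isIn k lower then true else pvInnerA ks lower

def detect_sensitive_columns (columns : List String) : List String :=
  columns.foldl (fun found col =>
    if pvInnerA pvKeywords (PySem.Chars.lower col.toList) then found ++ [col] else found) []

-- ===== PORT B =====
-- Source B: lows = lowered columns; hit = [False]*len; for each keyword, hit is rebuilt by
-- zipping it with lows ('h or keyword in low'); finally filter columns by the mask.
def detect_sensitive_columns_alt (columns : List String) : List String :=
  let lows := columns.map (fun col => PySem.Chars.lower col.toList)
  let hit := pvKeywords.foldl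
    (fun hit kw => List.zipWith (fun h low => h || PySem.Chars.isIn kw low) hit lows)
    (columns.map (fun _ => false))
  ((columns.zip hit).filter (fun p => p.2)).map (fun p => p.1)

-- ===== PRECONDITION & SPEC =====
def Spec_detect_sensitive_columns (columns : List String) (out : List String) : Prop := out = detect_sensitive_columns_alt columns
instance (columns : List String) (out : List String) : Decidable (Spec_detect_sensitive_columns columns out) := by unfold Spec_detect_sensitive_columns; infer_instance

-- ===== CLAIM (what is proved, stated in full; the proofs are below) =====
def Claim_equal_detect_sensitive_columns : Prop := ∀ (columns : List String), Dom_detect_sensitive_columns columns → Spec_detect_sensitive_columns columns (detect_sensitive_columns columns)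

-- ===== LEMMAS AND PROOFS =====

theorem pvInnerA_eq_any (ks : List (List Char)) (s : List Char) :
    pvInnerA ks s = ks.any (fun k => PySem.Chars.isIn k s) := by
  induction ks with
  | nil => simp [pvInnerA]
  | cons k ks ih => cases h : PySem.Chars.isIn k s <;> simp [pvInnerA, h, ih]

theorem pvZipWith_fst {α β : Type} (as : List α) (bs : List β)
    (h : as.length = bs.length) : List.zipWith (fun a _ => a) as bs = as := by
  induction as generalizing bs with
  | nil => simp
  | cons a as ih =>
    cases bs with
    | nil => simp at h
    | cons b bs => simp_all

theorem pvZipWith_zipWith {α β γ δ : Type} (f : α → β → γ) (g : γ → β → δ)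
    (as : List α) (bs : List β) :
    List.zipWith g (List.zipWith f as bs) bs
      = List.zipWith (fun a b => g (f a b) b) as bs := by
  induction as generalizing bs with
  | nil => simp
  | cons a as ih =>
    cases bs with
    | nil => simp
    | cons b bs => simp [ih]

theorem pvMask_foldl (kws : List (List Char)) (lows : List (List Char)) :
    ∀ (hit : List Bool), hit.length = lows.length →
    kws.foldl (fun hit kw => List.zipWith (fun h low => h || PySem.Chars.isIn kw low) hit lows) hit
      = List.zipWith (fun h low => h || kws.any (fun k => PySem.Chars.isIn k low)) hit lows := by
  induction kws with
  | nil =>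
    intro hit hlen
    simpa using (pvZipWith_fst hit lows hlen).symm
  | cons k kws ih =>
    intro hit hlen
    have hlen' : (List.zipWith (fun h low => h || PySem.Chars.isIn k low) hit lows).length = lows.length := by
      simp [hlen]
    calc (k :: kws).foldl (fun hit kw => List.zipWith (fun h low => h || PySem.Chars.isIn kw low) hit lows) hit
        = kws.foldl (fun hit kw => List.zipWith (fun h low => h || PySem.Chars.isIn kw low) hit lows)
            (List.zipWith (fun h low => h || PySem.Chars.isIn k low) hit lows) := by rfl
      _ = List.zipWith (fun h low => h || kws.any (fun k => PySem.Chars.isIn k low))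
            (List.zipWith (fun h low => h || PySem.Chars.isIn k low) hit lows) lows := ih _ hlen'
      _ = List.zipWith (fun h low => h || (k :: kws).any (fun k => PySem.Chars.isIn k low)) hit lows := by
            rw [pvZipWith_zipWith]
            congr 1
            funext h low
            simp [Bool.or_assoc]

theorem pvZipWith_map_map {α β γ δ : Type} (f : β → γ → δ) (g : α → β) (h : α → γ)
    (l : List α) :
    List.zipWith f (l.map g) (l.map h) = l.map (fun x => f (g x) (h x)) := by
  induction l with
  | nil => simp
  | cons a l ih => simp [ih]

theorem pvFilter_zip_map {α : Type} (P : α → Bool) (l : List α) :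
    (((l.zip (l.map P)).filter (fun p => p.2)).map (fun p => p.1)) = l.filter P := by
  induction l with
  | nil => simp
  | cons a l ih => cases h : P a <;> simp [h, ih]

-- ===== VERDICT (by name: the statement is the Claim_ definition above) =====
theorem detect_sensitive_columns_spec : Claim_equal_detect_sensitive_columns := by
  intro columns _
  unfold Spec_detect_sensitive_columns detect_sensitive_columns detect_sensitive_columns_alt
  rw [PySem.List.foldl_append_if_eq_filter, List.nil_append]
  dsimp only
  rw [pvMask_foldl _ _ _ (by simp)]
  rw [pvZipWith_map_map]
  simp only [Bool.false_or]
  rw [pvFilter_zip_map]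
  exact List.filter_congr (fun col _ => pvInnerA_eq_any _ _)
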